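-- pv_equiv track=rewrite | github.com/SuziAI/SuziGEN | repetitions.py | remove_single_repetition
-- ===== SOURCE A (Python) =====
-- def remove_single_repetition(first_stanza, second_stanza):
--     first_indices = [idx for idx, r_str in enumerate(first_stanza) if r_str == "r"]
--     second_indices = [idx for idx, r_str in enumerate(second_stanza) if r_str == "r"]
--
--     delete_indices = [idx for idx, el in enumerate(first_indices) if
--                       1 <= el < len(first_stanza) - 1 and first_stanza[el - 1:el + 2] == ".r."]
--     if first_stanza[0:2] == "r." and second_stanza[0:2] == "r.":
--         delete_indices += [0]
--
--     first_indices = [el for idx, el in enumerate(first_indices) if idx not in delete_indices]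
--     second_indices = [el for idx, el in enumerate(second_indices) if idx not in delete_indices]
--
--     first_stanza = "".join(["r" if idx in first_indices else "." for idx in range(len(first_stanza))])
--     second_stanza = "".join(["r" if idx in second_indices else "." for idx in range(len(second_stanza))])
--     return first_stanza, second_stanza
-- ===== SOURCE B (Python) =====
-- def remove_single_repetition(first_stanza, second_stanza):
--     # Different decomposition: the first output is decided purely locally per
--     # character (an 'r' survives unless isolated as '.r.', or it is the leading
--     # 'r' under the 'r.'/'r.' rule); while scanning we record each r's keep
--     # decision in a list that the second stanza then consumes positionally as a
--     # stream (no index lists, no rank sets, no membership tests).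
--     n = len(first_stanza)
--     lead = first_stanza[:2] == "r." and second_stanza[:2] == "r."
--     out1 = []
--     keep = []          # keep decision of the k-th 'r', in order
--     seen_r = False
--     for i, ch in enumerate(first_stanza):
--         if ch == "r":
--             isolated = 1 <= i < n - 1 and first_stanza[i - 1] == "." and first_stanza[i + 1] == "."
--             k = not isolated and not (lead and not seen_r)
--             seen_r = True
--             keep.append(k)
--             out1.append("r" if k else ".")
--         else:
--             out1.append(".")
--     it = iter(keep)
--     out2 = "".join(
--         ("r" if next(it, True) else ".") if ch == "r" else "." for ch in second_stanza
--     )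
--     return "".join(out1), out2
-- ===== Notes on version B (the rewrite author's own statement) =====
-- stated objective: alternative
-- what changed: Replaces A's r-position index lists, rank delete-list and membership-filtered rebuilds by a single scan of first_stanza that decides each character locally (emitting output 1 directly) while recording per-r keep decisions in a list that the second stanza then consumes positionally as a stream.
import Mathlib
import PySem

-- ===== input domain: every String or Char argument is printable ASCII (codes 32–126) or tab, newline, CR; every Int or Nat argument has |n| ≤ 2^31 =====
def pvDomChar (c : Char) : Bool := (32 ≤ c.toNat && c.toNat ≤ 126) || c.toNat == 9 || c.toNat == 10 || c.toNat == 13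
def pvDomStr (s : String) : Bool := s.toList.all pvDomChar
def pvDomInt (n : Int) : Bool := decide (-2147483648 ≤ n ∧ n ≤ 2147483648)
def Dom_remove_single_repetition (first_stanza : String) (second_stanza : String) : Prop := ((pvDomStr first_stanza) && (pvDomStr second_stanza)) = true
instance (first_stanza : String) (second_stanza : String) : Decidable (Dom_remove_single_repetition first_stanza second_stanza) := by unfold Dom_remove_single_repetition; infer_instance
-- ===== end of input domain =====

-- B decides the first output locally per character and records each r's keep decision in a list
-- that the second stanza consumes positionally as a stream: no index lists, no rank sets,
-- no membership tests (alternative decomposition).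

-- ===== PORT A =====
-- [idx for idx, r_str in enumerate(stanza) if r_str == "r"]  (used for both stanzas)
def pyRPositions (s : List Char) : List Int :=
  ((PySem.List.enumerate s 0).filter (fun p => p.2 == 'r')).map (·.1)

def remove_single_repetition (first_stanza : String) (second_stanza : String) : String × String :=
  let fs := first_stanza.toList
  let ss := second_stanza.toList
  let first_indices := pyRPositions fs
  let second_indices := pyRPositions ss
  let delete_indices :=
    ((PySem.List.enumerate first_indices 0).filter
      (fun p => decide (1 ≤ p.2) && decide (p.2 < (fs.length : Int) - 1) &&
        (PySem.List.slice fs (some (p.2 - 1)) (some (p.2 + 2)) == ['.', 'r', '.']))).map (·.1)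
  let delete_indices :=
    if PySem.List.slice fs (some 0) (some 2) == ['r', '.'] &&
       PySem.List.slice ss (some 0) (some 2) == ['r', '.'] then
      delete_indices ++ [0]
    else delete_indices
  let first_indices :=
    ((PySem.List.enumerate first_indices 0).filter
      (fun p => !(delete_indices.contains p.1))).map (·.2)
  let second_indices :=
    ((PySem.List.enumerate second_indices 0).filter
      (fun p => !(delete_indices.contains p.1))).map (·.2)
  let out1 := (PySem.List.pyRange 0 (fs.length : Int) 1).map
      (fun idx => if first_indices.contains idx then 'r' else '.')
  let out2 := (PySem.List.pyRange 0 (ss.length : Int) 1).map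
      (fun idx => if second_indices.contains idx then 'r' else '.')
  (String.ofList out1, String.ofList out2)

-- ===== PORT B =====
-- isolated(i): 1 <= i < n-1 and first_stanza[i-1] == '.' and first_stanza[i+1] == '.'
def rsbIsolated (s : List Char) (i : Int) : Bool :=
  decide (1 ≤ i) && decide (i < (s.length : Int) - 1) &&
    (PySem.List.pyGet? s (i - 1) == some '.') && (PySem.List.pyGet? s (i + 1) == some '.')

-- the scan of first_stanza: builds (out1, keep) with state (index i, seen_r)
def rsbFirst (s : List Char) (lead : Bool) : List Char → Int → Bool → List Char × List Bool
  | [], _, _ => ([], [])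
  | c :: t, i, seen =>
    if c == 'r' then
      let k := !(rsbIsolated s i) && !(lead && !seen)
      let r := rsbFirst s lead t (i + 1) true
      ((if k then 'r' else '.') :: r.1, k :: r.2)
    else
      let r := rsbFirst s lead t (i + 1) seen
      ('.' :: r.1, r.2)

-- next(it, True): pop the next keep decision, defaulting to true
def rsbNext : List Bool → Bool × List Bool
  | [] => (true, [])
  | k :: ks => (k, ks)

-- second stanza consumes the keep list as a stream
def rsbSecond : List Char → List Bool → List Char
  | [], _ => []
  | c :: t, ks =>
    if c == 'r' then
      let p := rsbNext ks
      (if p.1 then 'r' else '.') :: rsbSecond t p.2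
    else '.' :: rsbSecond t ks

def remove_single_repetition_alt (first_stanza : String) (second_stanza : String) : String × String :=
  let fs := first_stanza.toList
  let ss := second_stanza.toList
  let lead := (PySem.List.slice fs none (some 2) == ['r', '.']) &&
              (PySem.List.slice ss none (some 2) == ['r', '.'])
  let r := rsbFirst fs lead fs 0 false
  (String.ofList r.1, String.ofList (rsbSecond ss r.2))

-- ===== PRECONDITION & SPEC =====
def Spec_remove_single_repetition (first_stanza : String) (second_stanza : String) (out : String × String) : Prop := out = remove_single_repetition_alt first_stanza second_stanza
instance (first_stanza : String) (second_stanza : String) (out : String × String) : Decidable (Spec_remove_single_repetition first_stanza second_stanza out) := by unfold Spec_remove_single_repetition; infer_instance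

-- ===== CLAIM (what is proved, stated in full; the proofs are below) =====
def Claim_equal_remove_single_repetition : Prop := ∀ (first_stanza : String) (second_stanza : String), Dom_remove_single_repetition first_stanza second_stanza → Spec_remove_single_repetition first_stanza second_stanza (remove_single_repetition first_stanza second_stanza)

-- ===== LEMMAS AND PROOFS =====

def rsrPosG (s : List Char) (pos : Int) : List Int :=
  ((PySem.List.enumerate s pos).filter (fun p => p.2 == 'r')).map (·.1)

def rsrSurvG (s : List Char) (pos k : Int) (D : List Int) : List Int :=
  ((PySem.List.enumerate (rsrPosG s pos) k).filter (fun p => !(D.contains p.1))).map (·.2)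

def rsrDelG (s : List Char) (pos k : Int) (cond : Int → Bool) : List Int :=
  ((PySem.List.enumerate (rsrPosG s pos) k).filter (fun p => cond p.2)).map (·.1)

def rCnt : List Char → Int
  | [] => 0
  | c :: t => (if c == 'r' then 1 else 0) + rCnt t

-- reference rebuild: rank-counting pass emitting by membership in the delete list D
def rsrRebuild (D : List Int) : List Char → Int → List Char
  | [], _ => []
  | c :: rest, rank =>
    if c == 'r' then
      (if D.contains rank then '.' else 'r') :: rsrRebuild D rest (rank + 1)
    else
      '.' :: rsrRebuild D rest rank

-- keep-list specification: one Bool per 'r', ranks counted from k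
def rsrKeepL (D : List Int) : List Char → Int → List Bool
  | [], _ => []
  | c :: t, k =>
    if c = 'r' then (!(D.contains k)) :: rsrKeepL D t (k + 1) else rsrKeepL D t k

theorem rCnt_nonneg (s : List Char) : 0 ≤ rCnt s := by
  induction s with
  | nil => simp [rCnt]
  | cons c t ih => by_cases h : c = 'r' <;> simp [rCnt, h] <;> omega

theorem rsrPosG_cons (c : Char) (s : List Char) (pos : Int) :
    rsrPosG (c :: s) pos = (if c = 'r' then [pos] else []) ++ rsrPosG s (pos + 1) := by
  simp only [rsrPosG, PySem.List.enumerate_cons, List.filter_cons]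
  by_cases h : c = 'r' <;> simp [h]

theorem rsrSurvG_cons (c : Char) (s : List Char) (pos k : Int) (D : List Int) :
    rsrSurvG (c :: s) pos k D =
      (if c = 'r' then
        (if k ∈ D then [] else [pos]) ++ rsrSurvG s (pos + 1) (k + 1) D
       else rsrSurvG s (pos + 1) k D) := by
  by_cases h : c = 'r'
  · simp only [rsrSurvG, rsrPosG_cons, h, if_pos rfl, List.singleton_append,
      PySem.List.enumerate_cons, List.filter_cons]
    by_cases hk : k ∈ D <;> simp [hk]
  · simp [rsrSurvG, rsrPosG_cons, h]

theorem rsrDelG_cons (c : Char) (s : List Char) (pos k : Int) (cond : Int → Bool) :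
    rsrDelG (c :: s) pos k cond =
      (if c = 'r' then
        (if cond pos then [k] else []) ++ rsrDelG s (pos + 1) (k + 1) cond
       else rsrDelG s (pos + 1) k cond) := by
  by_cases h : c = 'r'
  · simp only [rsrDelG, rsrPosG_cons, h, if_pos rfl, List.singleton_append,
      PySem.List.enumerate_cons, List.filter_cons]
    by_cases hc : cond pos <;> simp [hc]
  · simp [rsrDelG, rsrPosG_cons, h]

theorem rsrSurvG_lb (s : List Char) (pos k : Int) (D : List Int) :
    ∀ x ∈ rsrSurvG s pos k D, pos ≤ x := by
  induction s generalizing pos k with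
  | nil => simp [rsrSurvG, rsrPosG]
  | cons c t ih =>
    intro x hx
    rw [rsrSurvG_cons] at hx
    by_cases h : c = 'r' <;> simp [h] at hx
    · rcases hx with hx | hx
      · by_cases hk : k ∈ D <;> simp [hk] at hx
        omega
      · have := ih (pos + 1) (k + 1) x hx; omega
    · have := ih (pos + 1) k x hx; omega

theorem rsrDelG_lb (s : List Char) (pos k : Int) (cond : Int → Bool) :
    ∀ x ∈ rsrDelG s pos k cond, k ≤ x := by
  induction s generalizing pos k with
  | nil => simp [rsrDelG, rsrPosG]
  | cons c t ih =>
    intro x hx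
    rw [rsrDelG_cons] at hx
    by_cases h : c = 'r' <;> simp [h] at hx
    · rcases hx with hx | hx
      · by_cases hc : cond pos <;> simp [hc] at hx
        omega
      · have := ih (pos + 1) (k + 1) x hx; omega
    · have := ih (pos + 1) k x hx; omega

theorem rsrDelG_ub (s : List Char) (pos k : Int) (cond : Int → Bool) :
    ∀ x ∈ rsrDelG s pos k cond, x < k + rCnt s := by
  induction s generalizing pos k with
  | nil => simp [rsrDelG, rsrPosG]
  | cons c t ih =>
    intro x hx
    rw [rsrDelG_cons] at hx
    have hn := rCnt_nonneg t
    by_cases h : c = 'r' <;> simp [h, rCnt] at hx ⊢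
    · rcases hx with hx | hx
      · by_cases hc : cond pos <;> simp [hc] at hx
        omega
      · have := ih (pos + 1) (k + 1) x hx; omega
    · have := ih (pos + 1) k x hx; omega

theorem rsrSurvG_mem (s : List Char) (pos k : Int) (D : List Int) (i : Nat) (hi : i < s.length) :
    ((pos + (i : Int)) ∈ rsrSurvG s pos k D ↔
      (s.getD i ' ' = 'r' ∧ (k + rCnt (s.take i)) ∉ D)) := by
  induction s generalizing pos k i with
  | nil => simp at hi
  | cons c t ih =>
    rw [rsrSurvG_cons]
    by_cases h : c = 'r'
    · rw [if_pos h]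
      cases i with
      | zero =>
        have hlb := rsrSurvG_lb t (pos + 1) (k + 1) D
        simp only [Nat.cast_zero, Int.add_zero, List.take_zero, List.getD_cons_zero, h, rCnt]
        by_cases hk : k ∈ D
        · simp only [hk, if_pos, List.nil_append]
          constructor
          · intro hx; have := hlb _ hx; omega
          · rintro ⟨_, h2⟩; exact absurd (by simpa using hk) h2
        · simp only [hk, if_neg, not_false_iff, List.mem_append, List.mem_singleton]
          constructor
          · intro _; exact ⟨by trivial, by simpa using hk⟩
          · intro _; simp
      | succ j =>
        have hj : j < t.length := by simpa using hi
        have hsh : pos + ((j : Int) + 1) = (pos + 1) + (j : Int) := by ring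
        have hkr : ∀ x : Int, k + 1 + x = k + (1 + x) := by intro x; ring
        have := ih (pos + 1) (k + 1) j hj
        push_cast
        rw [hsh]
        constructor
        · intro hx
          rcases List.mem_append.mp hx with hx | hx
          · exfalso
            by_cases hk : k ∈ D <;> simp [hk] at hx
            omega
          · have hres := this.mp hx
            refine ⟨by simpa using hres.1, ?_⟩
            simpa [rCnt, h, hkr] using hres.2
        · intro ⟨h1, h2⟩
          refine List.mem_append.mpr (Or.inr (this.mpr ⟨by simpa using h1, ?_⟩))
          rw [hkr]
          simpa [rCnt, h] using h2
    · rw [if_neg h]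
      cases i with
      | zero =>
        have hlb := rsrSurvG_lb t (pos + 1) k D
        simp only [Nat.cast_zero, Int.add_zero, List.getD_cons_zero]
        constructor
        · intro hx; have := hlb _ hx; omega
        · intro ⟨h1, _⟩; exact absurd h1 h
      | succ j =>
        have hj : j < t.length := by simpa using hi
        have hsh : pos + ((j : Int) + 1) = (pos + 1) + (j : Int) := by ring
        have := ih (pos + 1) k j hj
        push_cast
        rw [hsh, this]
        simp [rCnt, h]

-- membership of the rank of the r at position i in the delete list ↔ the condition at i
theorem rsrDelG_mem_at (cond : Int → Bool) (s : List Char) (pos k : Int) (i : Nat)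
    (hi : i < s.length) (hr : s.getD i ' ' = 'r') :
    ((k + rCnt (s.take i)) ∈ rsrDelG s pos k cond ↔ cond (pos + i) = true) := by
  induction s generalizing pos k i with
  | nil => simp at hi
  | cons c t ih =>
    rw [rsrDelG_cons]
    by_cases h : c = 'r'
    · rw [if_pos h]
      cases i with
      | zero =>
        have hlb := rsrDelG_lb t (pos + 1) (k + 1) cond
        simp only [Nat.cast_zero, Int.add_zero, List.take_zero, rCnt]
        by_cases hc : cond pos
        · simp [hc]
        · simp only [hc, Bool.false_eq_true, if_false, List.nil_append]
          constructor
          · intro hx; have := hlb _ hx; omega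
          · intro hx; exact absurd hx (by simp [hc])
      | succ j =>
        have hj : j < t.length := by simpa using hi
        have hr' : t.getD j ' ' = 'r' := by simpa using hr
        have hkr : k + rCnt ((c :: t).take (j + 1)) = (k + 1) + rCnt (t.take j) := by
          simp [List.take_succ_cons, rCnt, h]; ring
        have hsh : pos + ((j : Nat) + 1 : Nat) = (pos + 1) + (j : Int) := by push_cast; ring
        rw [hkr, hsh]
        have hn := rCnt_nonneg (t.take j)
        constructor
        · intro hx
          rcases List.mem_append.mp hx with hx | hx
          · exfalso
            by_cases hc : cond pos <;> simp [hc] at hx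
            omega
          · exact (ih (pos + 1) (k + 1) j hj hr').mp hx
        · intro hx
          exact List.mem_append.mpr (Or.inr ((ih (pos + 1) (k + 1) j hj hr').mpr hx))
    · rw [if_neg h]
      cases i with
      | zero => simp [List.getD_cons_zero] at hr; exact absurd hr h
      | succ j =>
        have hj : j < t.length := by simpa using hi
        have hr' : t.getD j ' ' = 'r' := by simpa using hr
        have hkr : k + rCnt ((c :: t).take (j + 1)) = k + rCnt (t.take j) := by
          simp [List.take_succ_cons, rCnt, h]
        have hsh : pos + ((j : Nat) + 1 : Nat) = (pos + 1) + (j : Int) := by push_cast; ring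
        rw [hkr, hsh]
        exact ih (pos + 1) k j hj hr'

def condA (s : List Char) : Int → Bool := fun el =>
  decide (1 ≤ el) && decide (el < (s.length : Int) - 1) &&
    (PySem.List.slice s (some (el - 1)) (some (el + 2)) == ['.', 'r', '.'])

theorem rsrRebuild_eq (D : List Int) (s : List Char) (k : Int) :
    rsrRebuild D s k = (List.range s.length).map
      (fun i => if s.getD i ' ' = 'r' ∧ (k + rCnt (s.take i)) ∉ D then 'r' else '.') := by
  induction s generalizing k with
  | nil => simp [rsrRebuild]
  | cons c t ih =>
    rw [rsrRebuild]
    have hrng : List.range (t.length + 1) = 0 :: List.map Nat.succ (List.range t.length) := List.range_succ_eq_map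
    rw [List.length_cons, hrng, List.map_cons, List.map_map]
    by_cases h : c = 'r'
    · have hb : (c == 'r') = true := by simp [h]
      rw [hb, if_pos rfl, ih (k + 1)]
      congr 1
      · by_cases hk : (k : Int) ∈ D
        · have h1 : D.contains k = true := by
            simpa [List.contains_iff_mem] using hk
          rw [if_pos h1, if_neg (by simp [List.take_zero, rCnt, hk])]
        · have h1 : ¬ D.contains k = true := by
            simpa [List.contains_iff_mem] using hk
          rw [if_neg h1, if_pos ⟨by simp [h], by simpa [List.take_zero, rCnt] using hk⟩]
      · refine List.map_congr_left (fun i _ => ?_)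
        simp only [Function.comp, List.getD_cons_succ, List.take_succ_cons, rCnt, h]
        have : k + 1 + rCnt (t.take i) = k + ((if ('r' == 'r') then 1 else 0) + rCnt (t.take i)) := by
          simp; ring
        rw [← this]
    · have hb : (c == 'r') = false := by simp [h]
      rw [hb]
      simp only [Bool.false_eq_true, if_false]
      rw [ih k]
      congr 1
      · simp [h]
      · refine List.map_congr_left (fun i _ => ?_)
        simp only [Function.comp, List.getD_cons_succ, List.take_succ_cons, rCnt, hb]
        simp

theorem rsr_take3 (s : List Char) (m : Nat) (hm : m + 2 < s.length) :
    (s.drop m).take 3 = [s[m], s[m+1], s[m+2]] := by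
  rw [List.drop_eq_getElem_cons (show m < s.length by omega),
    List.drop_eq_getElem_cons (show m + 1 < s.length by omega),
    List.drop_eq_getElem_cons (show m + 2 < s.length by omega)]
  rfl

theorem rsr_cond_eq (s : List Char) (i : Nat) (hi : i < s.length) (hr : s.getD i ' ' = 'r') :
    condA s (i : Int) = rsbIsolated s (i : Int) := by
  by_cases h1 : 1 ≤ (i : Int)
  · by_cases h2 : (i : Int) < (s.length : Int) - 1
    · have hi1 : 1 ≤ i := by omega
      have hi2 : i + 1 < s.length := by omega
      have e1 : (i : Int) - 1 = ((i - 1 : Nat) : Int) := by omega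
      have e2 : (i : Int) + 2 = ((i + 2 : Nat) : Int) := by omega
      have e3 : i - 1 + 2 = i + 1 := by omega
      have e4 : i - 1 + 1 = i := by omega
      have hgi : s[i] = 'r' := by rwa [List.getD_eq_getElem s ' ' hi] at hr
      have hsl : PySem.List.slice s (some ((i : Int) - 1)) (some ((i : Int) + 2))
          = [s[i-1]'(by omega), s[i], s[i+1]] := by
        rw [e1, e2, PySem.List.slice_natCast]
        have : i + 2 - (i - 1) = 3 := by omega
        rw [this, rsr_take3 s (i - 1) (by omega)]
        simp_rw [e3, e4]
      have hg1 : PySem.List.pyGet? s ((i : Int) - 1) = some (s[i-1]'(by omega)) := by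
        rw [e1, PySem.List.pyGet?_natCast s (i - 1), List.getElem?_eq_getElem (by omega)]
      have hg2 : PySem.List.pyGet? s ((i : Int) + 1) = some (s[i+1]'(by omega)) := by
        have : (i : Int) + 1 = ((i + 1 : Nat) : Int) := by omega
        rw [this, PySem.List.pyGet?_natCast s (i + 1), List.getElem?_eq_getElem (by omega)]
      simp only [condA, rsbIsolated, hsl, hg1, hg2, h1, h2, decide_true, Bool.true_and]
      by_cases ha : s[i-1]'(by omega) = '.' <;> by_cases hb : s[i+1]'(by omega) = '.' <;>
        simp [ha, hb, hgi]
    · simp [condA, rsbIsolated, h2]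
  · simp [condA, rsbIsolated, h1]

theorem rsrDelA_eq (s : List Char) :
    ((PySem.List.enumerate (pyRPositions s) 0).filter
      (fun p => decide (1 ≤ p.2) && decide (p.2 < (s.length : Int) - 1) &&
        (PySem.List.slice s (some (p.2 - 1)) (some (p.2 + 2)) == ['.', 'r', '.']))).map (·.1)
    = rsrDelG s 0 0 (condA s) := rfl

theorem rsrSurvA_eq (s : List Char) (D : List Int) :
    ((PySem.List.enumerate (pyRPositions s) 0).filter
      (fun p => !(D.contains p.1))).map (·.2) = rsrSurvG s 0 0 D := rfl

theorem rsrOut_eq (s : List Char) (D : List Int) :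
    (PySem.List.pyRange 0 (s.length : Int) 1).map
        (fun idx => if (rsrSurvG s 0 0 D).contains idx then 'r' else '.')
      = rsrRebuild D s 0 := by
  rw [PySem.List.pyRange_zero_natCast, List.map_map, rsrRebuild_eq]
  simp only [zero_add]
  refine List.map_congr_left (fun i hi => ?_)
  have hi' : i < s.length := List.mem_range.mp hi
  have hmem := rsrSurvG_mem s 0 0 D i hi'
  simp only [zero_add] at hmem
  simp only [Function.comp]
  by_cases hm : ((i : Int)) ∈ rsrSurvG s 0 0 D
  · rw [if_pos (by simpa [List.contains_iff_mem] using hm), if_pos (hmem.mp hm)]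
  · rw [if_neg (by simpa [List.contains_iff_mem] using hm), if_neg (fun hc => hm (hmem.mpr hc))]

-- ===== B-side lemmas =====

theorem rsrKeepL_nil_rCnt (D : List Int) (t : List Char) (k : Int)
    (h : rsrKeepL D t k = []) : rCnt t = 0 := by
  induction t generalizing k with
  | nil => simp [rCnt]
  | cons c t' ih =>
    by_cases hc : c = 'r'
    · rw [rsrKeepL, if_pos hc] at h; exact absurd h (by simp)
    · rw [rsrKeepL, if_neg hc] at h
      simp [rCnt, hc, ih k h]

theorem rsrKeepL_cons_elim (D : List Int) (t : List Char) (k : Int) (b : Bool) (l : List Bool)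
    (h : rsrKeepL D t k = b :: l) :
    b = !(D.contains k) ∧ ∃ t', l = rsrKeepL D t' (k + 1) ∧ rCnt t = 1 + rCnt t' := by
  induction t generalizing k with
  | nil => simp [rsrKeepL] at h
  | cons c t' ih =>
    by_cases hc : c = 'r'
    · rw [rsrKeepL, if_pos hc] at h
      obtain ⟨h1, h2⟩ := List.cons.injEq .. ▸ h
      refine ⟨(List.cons.inj h).1.symm, t', (List.cons.inj h).2.symm, ?_⟩
      simp [rCnt, hc]
    · rw [rsrKeepL, if_neg hc] at h
      obtain ⟨hb, t'', hl, hcnt⟩ := ih k h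
      exact ⟨hb, t'', hl, by simp [rCnt, hc, hcnt]⟩

theorem rsbSecond_eq (D : List Int) (ss : List Char) :
    ∀ (t : List Char) (k : Int), (∀ x ∈ D, x < k + rCnt t) →
      rsbSecond ss (rsrKeepL D t k) = rsrRebuild D ss k := by
  induction ss with
  | nil => intro t k _; simp [rsbSecond, rsrRebuild]
  | cons c ss' ih =>
    intro t k hub
    by_cases hc : c = 'r'
    · have hb : (c == 'r') = true := by simp [hc]
      cases hkt : rsrKeepL D t k with
      | nil =>
        have hz := rsrKeepL_nil_rCnt D t k hkt
        have hnk : k ∉ D := fun hm => by have := hub _ hm; omega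
        have hrec := ih [] (k + 1) (by intro x hx; have := hub _ hx; simp [rCnt] at *; omega)
        simp only [rsrKeepL] at hrec
        simp [rsbSecond, rsrRebuild, rsbNext, hb, hnk, hrec]
      | cons b l =>
        obtain ⟨hbv, t', hl, hcnt⟩ := rsrKeepL_cons_elim D t k b l hkt
        have hrec := ih t' (k + 1) (by intro x hx; have := hub _ hx; omega)
        by_cases hdk : k ∈ D <;>
          simp [rsbSecond, rsrRebuild, rsbNext, hb, hdk, hbv, hl, hrec]
    · have hb : (c == 'r') = false := by simp [hc]
      simp only [rsbSecond, rsrRebuild, hb, Bool.false_eq_true, if_false]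
      exact congrArg (List.cons '.') (ih t k hub)

-- main invariant for the scan of first_stanza
theorem rsbFirst_eq (fs : List Char) (lead : Bool) (D : List Int)
    (hD : D = rsrDelG fs 0 0 (condA fs) ++ (if lead then [0] else [])) :
    ∀ (t : List Char) (m : Nat), fs.drop m = t →
      rsbFirst fs lead t (m : Int) (decide (0 < rCnt (fs.take m)))
        = (rsrRebuild D t (rCnt (fs.take m)), rsrKeepL D t (rCnt (fs.take m))) := by
  intro t
  induction t with
  | nil => intro m _; simp [rsbFirst, rsrRebuild, rsrKeepL]
  | cons c t' ih =>
    intro m hdrop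
    have hm : m < fs.length := by
      by_contra h
      rw [List.drop_eq_nil_of_le (by omega)] at hdrop
      exact absurd hdrop (by simp)
    have hget : fs.getD m ' ' = c := by
      have h1 : (fs.drop m)[0]? = some c := by rw [hdrop]; rfl
      rw [List.getElem?_drop] at h1
      simp only [Nat.add_zero] at h1
      simp [List.getD_eq_getElem?_getD, h1]
    have hdrop' : fs.drop (m + 1) = t' := by
      have h := congrArg (fun l => List.drop 1 l) hdrop
      simp only [List.drop_drop] at h
      simpa [Nat.add_comm] using h
    have htake : fs.take (m + 1) = fs.take m ++ [c] := by
      rw [List.take_succ, List.getElem?_eq_getElem hm]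
      have : fs[m] = c := by rwa [List.getD_eq_getElem fs ' ' hm] at hget
      simp [this]
    have hcntapp : rCnt (fs.take (m + 1)) = rCnt (fs.take m) + (if c == 'r' then 1 else 0) := by
      rw [htake]
      have : ∀ (l : List Char), rCnt (l ++ [c]) = rCnt l + (if c == 'r' then 1 else 0) := by
        intro l; induction l with
        | nil => simp [rCnt]
        | cons a l' ihl => simp [rCnt, ihl]; ring
      exact this _
    set k := rCnt (fs.take m) with hk
    have hkn : 0 ≤ k := rCnt_nonneg _
    by_cases hc : c = 'r'
    · have hb : (c == 'r') = true := by simp [hc]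
      have hcnt1 : rCnt (fs.take (m + 1)) = k + 1 := by rw [hcntapp, hb]; simp
      have hseen1 : decide (0 < rCnt (fs.take (m + 1))) = true := by
        rw [hcnt1]; simp; omega
      -- the keep value equals !(D.contains k)
      have hgr : fs.getD m ' ' = 'r' := by rw [hget, hc]
      have hmemA : ((0 : Int) + rCnt (fs.take m)) ∈ rsrDelG fs 0 0 (condA fs) ↔
          condA fs ((0 : Int) + (m : Int)) = true := rsrDelG_mem_at (condA fs) fs 0 0 m hm hgr
      simp only [zero_add, ← hk] at hmemA
      have hcondeq : condA fs (m : Int) = rsbIsolated fs (m : Int) := rsr_cond_eq fs m hm hgr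
      have hkeep : (!(rsbIsolated fs (m : Int)) && !(lead && !(decide (0 < k)))) = !(D.contains k) := by
        have hmemD : k ∈ D ↔ (rsbIsolated fs (m : Int) = true ∨ (lead = true ∧ k = 0)) := by
          rw [hD, List.mem_append]
          constructor
          · rintro (h | h)
            · exact Or.inl (by rw [← hcondeq]; exact hmemA.mp h)
            · cases hl : lead
              · rw [hl] at h; simp at h
              · rw [hl] at h; simp at h; exact Or.inr ⟨rfl, h⟩
          · rintro (h | ⟨hl, hk0⟩)
            · exact Or.inl (hmemA.mpr (by rw [hcondeq]; exact h))
            · right; rw [hl, hk0]; simp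
        by_cases hiso : rsbIsolated fs (m : Int) = true
        · have hmem : k ∈ D := hmemD.mpr (Or.inl hiso)
          simp [hiso, hmem]
        · have hiso' : rsbIsolated fs (m : Int) = false := by
            cases h : rsbIsolated fs (m : Int)
            · rfl
            · exact absurd h hiso
          by_cases hl : lead = true
          · by_cases hk0 : k = 0
            · have hmem : k ∈ D := hmemD.mpr (Or.inr ⟨hl, hk0⟩)
              have hmem0 : (0 : Int) ∈ D := hk0 ▸ hmem
              simp [hiso', hl, hmem, hmem0, hk0]
            · have hnmem : k ∉ D := fun hm => by
                rcases hmemD.mp hm with h | ⟨_, h⟩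
                · exact absurd h hiso
                · exact absurd h hk0
              have hpos : decide (0 < k) = true := by simp; omega
              simp [hiso', hl, hpos, hnmem]
          · have hl' : lead = false := by
              cases h : lead
              · rfl
              · exact absurd h hl
            have hnmem : k ∉ D := fun hm => by
              rcases hmemD.mp hm with h | ⟨h, _⟩
              · exact absurd h hiso
              · exact absurd h hl
            simp [hiso', hl', hnmem]
      have hrec := ih (m + 1) hdrop'
      rw [hseen1, hcnt1] at hrec
      have hcast : ((m : Int) + 1) = ((m + 1 : Nat) : Int) := by push_cast; ring
      rw [rsbFirst, hb, if_pos rfl]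
      simp only [hcast, hrec, hkeep]
      by_cases hdk : k ∈ D <;> simp [rsrRebuild, rsrKeepL, hb, hc, hdk]
    · have hb : (c == 'r') = false := by simp [hc]
      have hcnt1 : rCnt (fs.take (m + 1)) = k := by rw [hcntapp, hb]; simp
      have hrec := ih (m + 1) hdrop'
      rw [hcnt1] at hrec
      have hcast : ((m : Int) + 1) = ((m + 1 : Nat) : Int) := by push_cast; ring
      rw [rsbFirst, hb]
      simp only [Bool.false_eq_true, if_false, hcast, hrec]
      rw [rsrRebuild, rsrKeepL, hb, if_neg hc]
      simp

theorem rsr_main (fs ss : List Char) :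
    remove_single_repetition (String.ofList fs) (String.ofList ss)
      = remove_single_repetition_alt (String.ofList fs) (String.ofList ss) := by
  simp only [remove_single_repetition, remove_single_repetition_alt, String.toList_ofList,
    PySem.List.slice_zero_start, rsrDelA_eq]
  set g := (PySem.List.slice fs none (some 2) == ['r', '.']) &&
           (PySem.List.slice ss none (some 2) == ['r', '.']) with hgdef
  set D : List Int := rsrDelG fs 0 0 (condA fs) ++ (if g then [0] else []) with hDdef
  have hDeq : (if g = true then rsrDelG fs 0 0 (condA fs) ++ [0]
               else rsrDelG fs 0 0 (condA fs)) = D := by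
    cases hl : g <;> simp [hDdef, hl]
  have hubD : ∀ x ∈ D, x < 0 + rCnt fs := by
    intro x hx
    rw [hDdef, List.mem_append] at hx
    rcases hx with hx | hx
    · simpa using rsrDelG_ub fs 0 0 (condA fs) x hx
    · cases hl : g
      · rw [hl] at hx; simp at hx
      · rw [hl] at hx; simp at hx
        subst hx
        have hge : ((PySem.List.slice fs none (some 2) == ['r', '.']) &&
            (PySem.List.slice ss none (some 2) == ['r', '.'])) = true := by
          rw [← hgdef]; exact hl
        have h1 : PySem.List.slice fs none (some 2) = ['r', '.'] := by
          simpa using (Bool.and_eq_true _ _ |>.mp hge).1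
        have h2 : fs.take 2 = ['r', '.'] := by
          rw [PySem.List.slice_to fs (by norm_num)] at h1
          simpa using h1
        have hfs : fs = 'r' :: '.' :: fs.drop 2 := by
          conv_lhs => rw [← List.take_append_drop 2 fs]
          rw [h2]
          rfl
        rw [hfs]
        have := rCnt_nonneg (fs.drop 2)
        simp [rCnt]
        omega
  have hfirst := rsbFirst_eq fs g D hDdef fs 0 (by simp)
  simp only [List.take_zero, rCnt, Nat.cast_zero] at hfirst
  have hfirst' : rsbFirst fs g fs 0 false = (rsrRebuild D fs 0, rsrKeepL D fs 0) := by
    have hd : decide ((0 : Int) < 0) = false := by simp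
    simpa [hd] using hfirst
  rw [hDeq, hfirst']
  rw [rsrSurvA_eq, rsrSurvA_eq, rsrOut_eq, rsrOut_eq, rsbSecond_eq D ss fs 0 hubD]

-- ===== VERDICT (by name: the statement is the Claim_ definition above) =====
theorem remove_single_repetition_spec : Claim_equal_remove_single_repetition := by
  intro f s _
  unfold Spec_remove_single_repetition
  have h := rsr_main f.toList s.toList
  rwa [String.ofList_toList, String.ofList_toList] at h
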